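-- pv_equiv track=rewrite | github.com/MarkMurphy94/Dashboard_generator | ads_site/ads_app/models.py | sort_child_list
-- ===== SOURCE A (Python) =====
-- def sort_child_list(child_list):
--     """
--         Sorts the child list adding New Features, Manual, and Automated test
--         suites in the front of hte list
--
--         :return sorted child list
--     """
--     sorted_dictionary = {0: list(), 1: list(), 2: list(), 3: list(), 4: list(),
--                          5: list(), 6: list()}
--
--     if len(child_list) <= 1:
--         return child_list
--     else:
--         for child in child_list:
--             name = child['name']
--             if "New Feat" in name:
--                 sorted_dictionary[0].append(child)
--             elif "Man" in name:
--                 sorted_dictionary[1].append(child)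
--             elif "Auto" in name:
--                 sorted_dictionary[2].append(child)
--             elif "Meter Farm" in name:
--                 sorted_dictionary[3].append(child)
--             elif "Garden" in name:
--                 sorted_dictionary[4].append(child)
--             elif "SVE" in name:
--                 sorted_dictionary[5].append(child)
--             else:
--                 sorted_dictionary[6].append(child)
--
--     del child_list[:]
--     for key in sorted_dictionary:
--         if sorted_dictionary[key]:
--             items = sorted_dictionary[key]
--             for item in items:
--                 child_list.append(item)
--
--     return child_list
-- ===== SOURCE B (Python) =====
-- def _priority(child):
--     name = child['name']
--     if "New Feat" in name:
--         return 0
--     if "Man" in name: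
--         return 1
--     if "Auto" in name:
--         return 2
--     if "Meter Farm" in name:
--         return 3
--     if "Garden" in name:
--         return 4
--     if "SVE" in name:
--         return 5
--     return 6
--
--
-- def sort_child_list(child_list):
--     """Stable in-place sort by a priority key instead of bucketing into a dict."""
--     if len(child_list) <= 1:
--         return child_list
--     child_list.sort(key=_priority)
--     return child_list
-- ===== Notes on version B (the rewrite author's own statement) =====
-- stated objective: simpler
-- what changed: Replaces the seven-bucket dict accumulation and the rebuild loop with a single stable sort by a priority key function.
import Mathlib
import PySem

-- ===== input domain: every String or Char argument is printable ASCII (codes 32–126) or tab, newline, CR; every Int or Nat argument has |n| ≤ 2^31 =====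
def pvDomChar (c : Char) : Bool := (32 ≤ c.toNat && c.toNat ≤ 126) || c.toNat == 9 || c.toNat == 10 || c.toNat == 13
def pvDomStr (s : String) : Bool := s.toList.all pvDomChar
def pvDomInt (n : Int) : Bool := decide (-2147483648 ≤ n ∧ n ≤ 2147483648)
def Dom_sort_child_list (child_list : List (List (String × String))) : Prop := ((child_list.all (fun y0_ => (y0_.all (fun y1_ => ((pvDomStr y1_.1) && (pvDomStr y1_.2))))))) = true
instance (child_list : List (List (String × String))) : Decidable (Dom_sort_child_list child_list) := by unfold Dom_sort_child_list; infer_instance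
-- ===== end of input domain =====

-- B replaces A's seven-bucket dict accumulation and rebuild loop with one stable sort by a
-- priority key (objective: simpler). Both A and B mutate child_list in place in Python; the
-- equivalence proved here is about the RETURN value only.


-- ===== PORT A =====
-- child['name'] : first-match lookup in the association list; Pre_ guarantees the key is
-- present wherever it is read (a missing key is a KeyError in Python, excluded by Pre_).
def pvName (child : List (String × String)) : String :=
  (((child.find? (fun p => p.1 == "name")).map Prod.snd).getD "")

-- sorted_dictionary = {0: [], 1: [], …, 6: []}
def pvDict0 : PySem.Dict Int (List (List (String × String))) :=
  PySem.Dict.ofList [(0, []), (1, []), (2, []), (3, []), (4, []), (5, []), (6, [])]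

def sort_child_list (child_list : List (List (String × String))) : List (List (String × String)) :=
  if child_list.length ≤ 1 then child_list
  else
    -- the loop filling sorted_dictionary, then the rebuild loop over its items
    ((child_list.foldl (fun d child =>
      if PySem.Str.isIn "New Feat" (pvName child) then d.modify 0 [] (· ++ [child])
      else if PySem.Str.isIn "Man" (pvName child) then d.modify 1 [] (· ++ [child])
      else if PySem.Str.isIn "Auto" (pvName child) then d.modify 2 [] (· ++ [child])
      else if PySem.Str.isIn "Meter Farm" (pvName child) then d.modify 3 [] (· ++ [child])
      else if PySem.Str.isIn "Garden" (pvName child) then d.modify 4 [] (· ++ [child])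
      else if PySem.Str.isIn "SVE" (pvName child) then d.modify 5 [] (· ++ [child])
      else d.modify 6 [] (· ++ [child])) pvDict0).items).foldl (fun cl kv =>
      if !kv.2.isEmpty then kv.2.foldl (fun cl2 item => cl2 ++ [item]) cl else cl) []

-- ===== PORT B =====
def pvPriority (child : List (String × String)) : Int :=
  if PySem.Str.isIn "New Feat" (pvName child) then 0
  else if PySem.Str.isIn "Man" (pvName child) then 1
  else if PySem.Str.isIn "Auto" (pvName child) then 2
  else if PySem.Str.isIn "Meter Farm" (pvName child) then 3
  else if PySem.Str.isIn "Garden" (pvName child) then 4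
  else if PySem.Str.isIn "SVE" (pvName child) then 5
  else 6

def sort_child_list_alt (child_list : List (List (String × String))) : List (List (String × String)) :=
  if child_list.length ≤ 1 then child_list
  else PySem.List.sorted child_list pvPriority

-- ===== PRECONDITION & SPEC =====
-- Pre_ excludes exactly the inputs where Python A raises KeyError: a list of two or more
-- children one of which has no "name" key (for length ≤ 1 A returns before any lookup).
def Pre_sort_child_list (child_list : List (List (String × String))) : Prop :=
  child_list.length ≤ 1 ∨ ∀ c ∈ child_list, (c.find? (fun p => p.1 == "name")).isSome = true
instance (child_list : List (List (String × String))) : Decidable (Pre_sort_child_list child_list) := by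
  unfold Pre_sort_child_list; infer_instance

def pvWitness_sort_child_list : (List (List (String × String))) :=
  [[("name", "Man a")], [("name", "zz")], [("name", "New Feat 1")]]

def Spec_sort_child_list (child_list : List (List (String × String))) (out : List (List (String × String))) : Prop := out = sort_child_list_alt child_list
instance (child_list : List (List (String × String))) (out : List (List (String × String))) : Decidable (Spec_sort_child_list child_list out) := by unfold Spec_sort_child_list; infer_instance

-- ===== CLAIM (what is proved, stated in full; the proofs are below) =====
def Claim_equal_sort_child_list : Prop := ∀ (child_list : List (List (String × String))), Dom_sort_child_list child_list → Pre_sort_child_list child_list → Spec_sort_child_list child_list (sort_child_list child_list)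

-- ===== LEMMAS AND PROOFS =====

-- the bucket of priority k, and the concatenation of the seven buckets
def pvFilt (k : Int) (xs : List (List (String × String))) : List (List (String × String)) :=
  xs.filter (fun c => pvPriority c == k)

def pvCat (xs : List (List (String × String))) : List (List (String × String)) :=
  pvFilt 0 xs ++ pvFilt 1 xs ++ pvFilt 2 xs ++ pvFilt 3 xs ++ pvFilt 4 xs ++ pvFilt 5 xs ++ pvFilt 6 xs

def pvMkD (b0 b1 b2 b3 b4 b5 b6 : List (List (String × String))) :
    PySem.Dict Int (List (List (String × String))) :=
  PySem.Dict.ofList [(0, b0), (1, b1), (2, b2), (3, b3), (4, b4), (5, b5), (6, b6)]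

theorem pvPriority_cases (c : List (String × String)) :
    pvPriority c = 0 ∨ pvPriority c = 1 ∨ pvPriority c = 2 ∨ pvPriority c = 3 ∨
    pvPriority c = 4 ∨ pvPriority c = 5 ∨ pvPriority c = 6 := by
  unfold pvPriority; split_ifs <;> simp

-- insertBy lands between the elements it must not precede and those it must
theorem pv_insert_mid {α : Type} (bef : α → α → Bool) (x : α) :
    ∀ (l r : List α), (∀ e ∈ l, bef x e = false) → (∀ e ∈ r, bef x e = true) →
      PySem.List.insertBy bef x (l ++ r) = l ++ x :: r := by
  intro l
  induction l with
  | nil =>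
    intro r _ hr
    cases r with
    | nil => simp [PySem.List.insertBy]
    | cons a t => simp [PySem.List.insertBy, hr a (by simp)]
  | cons a t ih =>
    intro r hl hr
    simp only [List.cons_append, PySem.List.insertBy, hl a (by simp)]
    simp [ih r (fun e he => hl e (by simp [he])) hr]

theorem pvFilt_append_single (k : Int) (x : List (String × String)) (ys : List (List (String × String))) :
    pvFilt k (ys ++ [x]) = pvFilt k ys ++ if pvPriority x == k then [x] else [] := by
  simp [pvFilt, List.filter_append, List.filter_singleton]

theorem pvFilt_cons (k : Int) (x : List (String × String)) (ys : List (List (String × String))) :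
    pvFilt k (x :: ys) = if pvPriority x == k then x :: pvFilt k ys else pvFilt k ys := by
  simp [pvFilt, List.filter_cons]

theorem pv_mem_filt (k : Int) (e : List (String × String)) (ys : List (List (String × String)))
    (he : e ∈ pvFilt k ys) : pvPriority e = k := by
  simp only [pvFilt, List.mem_filter, beq_iff_eq] at he
  exact he.2

theorem pv_insert_cat (x : List (String × String)) (ys : List (List (String × String))) :
    PySem.List.insertBy (fun a b => decide (pvPriority a < pvPriority b)) x (pvCat ys) =
      pvCat (ys ++ [x]) := by
  rcases pvPriority_cases x with hp | hp | hp | hp | hp | hp | hp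
  · have h := pv_insert_mid (fun a b => decide (pvPriority a < pvPriority b)) x
        (pvFilt 0 ys) (pvFilt 1 ys ++ pvFilt 2 ys ++ pvFilt 3 ys ++ pvFilt 4 ys ++ pvFilt 5 ys ++ pvFilt 6 ys)
        (by intro e he; simp [pv_mem_filt _ _ _ he, hp])
        (by
          intro e he
          simp only [List.mem_append] at he
          rcases he with (((((he)|he)|he)|he)|he)|he <;> simp [pv_mem_filt _ _ _ he, hp])
    simp only [List.append_assoc] at h
    simpa [pvCat, pvFilt_append_single, hp] using h
  · have h := pv_insert_mid (fun a b => decide (pvPriority a < pvPriority b)) x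
        (pvFilt 0 ys ++ pvFilt 1 ys) (pvFilt 2 ys ++ pvFilt 3 ys ++ pvFilt 4 ys ++ pvFilt 5 ys ++ pvFilt 6 ys)
        (by
          intro e he
          simp only [List.mem_append] at he
          rcases he with (he)|he <;> simp [pv_mem_filt _ _ _ he, hp])
        (by
          intro e he
          simp only [List.mem_append] at he
          rcases he with ((((he)|he)|he)|he)|he <;> simp [pv_mem_filt _ _ _ he, hp])
    simp only [List.append_assoc] at h
    simpa [pvCat, pvFilt_append_single, hp] using h
  · have h := pv_insert_mid (fun a b => decide (pvPriority a < pvPriority b)) x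
        (pvFilt 0 ys ++ pvFilt 1 ys ++ pvFilt 2 ys) (pvFilt 3 ys ++ pvFilt 4 ys ++ pvFilt 5 ys ++ pvFilt 6 ys)
        (by
          intro e he
          simp only [List.mem_append] at he
          rcases he with ((he)|he)|he <;> simp [pv_mem_filt _ _ _ he, hp])
        (by
          intro e he
          simp only [List.mem_append] at he
          rcases he with (((he)|he)|he)|he <;> simp [pv_mem_filt _ _ _ he, hp])
    simp only [List.append_assoc] at h
    simpa [pvCat, pvFilt_append_single, hp] using h
  · have h := pv_insert_mid (fun a b => decide (pvPriority a < pvPriority b)) x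
        (pvFilt 0 ys ++ pvFilt 1 ys ++ pvFilt 2 ys ++ pvFilt 3 ys) (pvFilt 4 ys ++ pvFilt 5 ys ++ pvFilt 6 ys)
        (by
          intro e he
          simp only [List.mem_append] at he
          rcases he with (((he)|he)|he)|he <;> simp [pv_mem_filt _ _ _ he, hp])
        (by
          intro e he
          simp only [List.mem_append] at he
          rcases he with ((he)|he)|he <;> simp [pv_mem_filt _ _ _ he, hp])
    simp only [List.append_assoc] at h
    simpa [pvCat, pvFilt_append_single, hp] using h
  · have h := pv_insert_mid (fun a b => decide (pvPriority a < pvPriority b)) x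
        (pvFilt 0 ys ++ pvFilt 1 ys ++ pvFilt 2 ys ++ pvFilt 3 ys ++ pvFilt 4 ys) (pvFilt 5 ys ++ pvFilt 6 ys)
        (by
          intro e he
          simp only [List.mem_append] at he
          rcases he with ((((he)|he)|he)|he)|he <;> simp [pv_mem_filt _ _ _ he, hp])
        (by
          intro e he
          simp only [List.mem_append] at he
          rcases he with (he)|he <;> simp [pv_mem_filt _ _ _ he, hp])
    simp only [List.append_assoc] at h
    simpa [pvCat, pvFilt_append_single, hp] using h
  · have h := pv_insert_mid (fun a b => decide (pvPriority a < pvPriority b)) x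
        (pvFilt 0 ys ++ pvFilt 1 ys ++ pvFilt 2 ys ++ pvFilt 3 ys ++ pvFilt 4 ys ++ pvFilt 5 ys) (pvFilt 6 ys)
        (by
          intro e he
          simp only [List.mem_append] at he
          rcases he with (((((he)|he)|he)|he)|he)|he <;> simp [pv_mem_filt _ _ _ he, hp])
        (by intro e he; simp [pv_mem_filt _ _ _ he, hp])
    simp only [List.append_assoc] at h
    simpa [pvCat, pvFilt_append_single, hp] using h
  · have h := pv_insert_mid (fun a b => decide (pvPriority a < pvPriority b)) x
        (pvFilt 0 ys ++ pvFilt 1 ys ++ pvFilt 2 ys ++ pvFilt 3 ys ++ pvFilt 4 ys ++ pvFilt 5 ys ++ pvFilt 6 ys) ([])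
        (by
          intro e he
          simp only [List.mem_append] at he
          rcases he with ((((((he)|he)|he)|he)|he)|he)|he <;> simp [pv_mem_filt _ _ _ he, hp])
        (by intro e he; simp at he)
    simp only [List.append_assoc, List.append_nil] at h
    simpa [pvCat, pvFilt_append_single, hp] using h

theorem pv_sorted_eq_cat (xs : List (List (String × String))) :
    PySem.List.sorted xs pvPriority = pvCat xs := by
  rw [PySem.List.sorted_eq_foldl_insertBy]
  suffices h : ∀ (zs ys : List (List (String × String))),
      zs.foldl (fun acc x => PySem.List.insertBy (fun a b => decide (pvPriority a < pvPriority b)) x acc) (pvCat ys)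
        = pvCat (ys ++ zs) by
    have := h xs []
    simpa [pvCat, pvFilt] using this
  intro zs
  induction zs with
  | nil => intro ys; simp
  | cons z t ih =>
    intro ys
    simp only [List.foldl_cons, pv_insert_cat]
    rw [ih (ys ++ [z])]
    simp

theorem pv_mod0 (b0 b1 b2 b3 b4 b5 b6 : List (List (String × String))) (c : List (String × String)) :
    (pvMkD b0 b1 b2 b3 b4 b5 b6).modify 0 [] (· ++ [c]) = pvMkD (b0 ++ [c]) b1 b2 b3 b4 b5 b6 := rfl
theorem pv_mod1 (b0 b1 b2 b3 b4 b5 b6 : List (List (String × String))) (c : List (String × String)) :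
    (pvMkD b0 b1 b2 b3 b4 b5 b6).modify 1 [] (· ++ [c]) = pvMkD b0 (b1 ++ [c]) b2 b3 b4 b5 b6 := rfl
theorem pv_mod2 (b0 b1 b2 b3 b4 b5 b6 : List (List (String × String))) (c : List (String × String)) :
    (pvMkD b0 b1 b2 b3 b4 b5 b6).modify 2 [] (· ++ [c]) = pvMkD b0 b1 (b2 ++ [c]) b3 b4 b5 b6 := rfl
theorem pv_mod3 (b0 b1 b2 b3 b4 b5 b6 : List (List (String × String))) (c : List (String × String)) :
    (pvMkD b0 b1 b2 b3 b4 b5 b6).modify 3 [] (· ++ [c]) = pvMkD b0 b1 b2 (b3 ++ [c]) b4 b5 b6 := rfl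
theorem pv_mod4 (b0 b1 b2 b3 b4 b5 b6 : List (List (String × String))) (c : List (String × String)) :
    (pvMkD b0 b1 b2 b3 b4 b5 b6).modify 4 [] (· ++ [c]) = pvMkD b0 b1 b2 b3 (b4 ++ [c]) b5 b6 := rfl
theorem pv_mod5 (b0 b1 b2 b3 b4 b5 b6 : List (List (String × String))) (c : List (String × String)) :
    (pvMkD b0 b1 b2 b3 b4 b5 b6).modify 5 [] (· ++ [c]) = pvMkD b0 b1 b2 b3 b4 (b5 ++ [c]) b6 := rfl
theorem pv_mod6 (b0 b1 b2 b3 b4 b5 b6 : List (List (String × String))) (c : List (String × String)) :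
    (pvMkD b0 b1 b2 b3 b4 b5 b6).modify 6 [] (· ++ [c]) = pvMkD b0 b1 b2 b3 b4 b5 (b6 ++ [c]) := rfl

theorem pv_foldA (xs : List (List (String × String))) :
    ∀ (b0 b1 b2 b3 b4 b5 b6 : List (List (String × String))),
      xs.foldl (fun d child =>
        if PySem.Str.isIn "New Feat" (pvName child) then d.modify 0 [] (· ++ [child])
        else if PySem.Str.isIn "Man" (pvName child) then d.modify 1 [] (· ++ [child])
        else if PySem.Str.isIn "Auto" (pvName child) then d.modify 2 [] (· ++ [child])
        else if PySem.Str.isIn "Meter Farm" (pvName child) then d.modify 3 [] (· ++ [child])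
        else if PySem.Str.isIn "Garden" (pvName child) then d.modify 4 [] (· ++ [child])
        else if PySem.Str.isIn "SVE" (pvName child) then d.modify 5 [] (· ++ [child])
        else d.modify 6 [] (· ++ [child])) (pvMkD b0 b1 b2 b3 b4 b5 b6)
      = pvMkD (b0 ++ pvFilt 0 xs) (b1 ++ pvFilt 1 xs) (b2 ++ pvFilt 2 xs) (b3 ++ pvFilt 3 xs)
              (b4 ++ pvFilt 4 xs) (b5 ++ pvFilt 5 xs) (b6 ++ pvFilt 6 xs) := by
  induction xs with
  | nil => intro b0 b1 b2 b3 b4 b5 b6; simp [pvFilt]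
  | cons x t ih =>
    intro b0 b1 b2 b3 b4 b5 b6
    simp only [List.foldl_cons]
    by_cases h1 : PySem.Str.isIn "New Feat" (pvName x) = true
    · have hp : pvPriority x = 0 := by unfold pvPriority; rw [if_pos h1]
      rw [if_pos h1, pv_mod0, ih]
      simp only [pvFilt_cons, hp, beq_iff_eq, List.append_assoc]
      norm_num
    by_cases h2 : PySem.Str.isIn "Man" (pvName x) = true
    · have hp : pvPriority x = 1 := by unfold pvPriority; rw [if_neg h1, if_pos h2]
      rw [if_neg h1, if_pos h2, pv_mod1, ih]
      simp only [pvFilt_cons, hp, beq_iff_eq, List.append_assoc]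
      norm_num
    by_cases h3 : PySem.Str.isIn "Auto" (pvName x) = true
    · have hp : pvPriority x = 2 := by unfold pvPriority; rw [if_neg h1, if_neg h2, if_pos h3]
      rw [if_neg h1, if_neg h2, if_pos h3, pv_mod2, ih]
      simp only [pvFilt_cons, hp, beq_iff_eq, List.append_assoc]
      norm_num
    by_cases h4 : PySem.Str.isIn "Meter Farm" (pvName x) = true
    · have hp : pvPriority x = 3 := by unfold pvPriority; rw [if_neg h1, if_neg h2, if_neg h3, if_pos h4]
      rw [if_neg h1, if_neg h2, if_neg h3, if_pos h4, pv_mod3, ih]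
      simp only [pvFilt_cons, hp, beq_iff_eq, List.append_assoc]
      norm_num
    by_cases h5 : PySem.Str.isIn "Garden" (pvName x) = true
    · have hp : pvPriority x = 4 := by unfold pvPriority; rw [if_neg h1, if_neg h2, if_neg h3, if_neg h4, if_pos h5]
      rw [if_neg h1, if_neg h2, if_neg h3, if_neg h4, if_pos h5, pv_mod4, ih]
      simp only [pvFilt_cons, hp, beq_iff_eq, List.append_assoc]
      norm_num
    by_cases h6 : PySem.Str.isIn "SVE" (pvName x) = true
    · have hp : pvPriority x = 5 := by unfold pvPriority; rw [if_neg h1, if_neg h2, if_neg h3, if_neg h4, if_neg h5, if_pos h6]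
      rw [if_neg h1, if_neg h2, if_neg h3, if_neg h4, if_neg h5, if_pos h6, pv_mod5, ih]
      simp only [pvFilt_cons, hp, beq_iff_eq, List.append_assoc]
      norm_num
    have hp : pvPriority x = 6 := by unfold pvPriority; rw [if_neg h1, if_neg h2, if_neg h3, if_neg h4, if_neg h5, if_neg h6]
    rw [if_neg h1, if_neg h2, if_neg h3, if_neg h4, if_neg h5, if_neg h6, pv_mod6, ih]
    simp only [pvFilt_cons, hp, beq_iff_eq, List.append_assoc]
    norm_num

theorem pv_items (l0 l1 l2 l3 l4 l5 l6 : List (List (String × String))) :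
    (pvMkD l0 l1 l2 l3 l4 l5 l6).items
      = [(0, l0), (1, l1), (2, l2), (3, l3), (4, l4), (5, l5), (6, l6)] := rfl

theorem pv_step (cl l : List (List (String × String))) :
    (if !l.isEmpty then l.foldl (fun cl2 item => cl2 ++ [item]) cl else cl) = cl ++ l := by
  cases l with
  | nil => simp
  | cons a t =>
    simp only [List.isEmpty_cons, Bool.not_false, if_true]
    exact PySem.List.foldl_append_singleton (a :: t) cl

theorem pv_A_eq_cat (xs : List (List (String × String))) (h : ¬ xs.length ≤ 1) :
    sort_child_list xs = pvCat xs := by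
  unfold sort_child_list
  rw [if_neg h]
  have h0 : pvDict0 = pvMkD [] [] [] [] [] [] [] := rfl
  rw [h0, pv_foldA, pv_items]
  simp only [List.foldl_cons, List.foldl_nil, pv_step]
  simp [pvCat]

-- ===== VERDICT (by name: the statement is the Claim_ definition above) =====
theorem sort_child_list_spec : Claim_equal_sort_child_list := by
  intro cl _ _
  unfold Spec_sort_child_list sort_child_list_alt
  by_cases h : cl.length ≤ 1
  · simp [sort_child_list, h]
  · rw [pv_A_eq_cat cl h, pv_sorted_eq_cat]
    simp [h]
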